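-- pv_equiv track=rewrite | github.com/simone-chen/aiconfigurator | src/aiconfigurator/generator/utils/node_allocation.py | allocate_disagg_nodes
-- ===== SOURCE A (Python) =====
-- from typing import List, Dict
--
-- GPU_PER_NODE = 8 # TODO: Support other situations.
--
-- def allocate_disagg_nodes(p_worker: int, p_gpu: int, d_worker: int, d_gpu: int,
--                           gpu_per_node: int = GPU_PER_NODE) -> List[Dict[str, int]]:
--     """Greedy placement of workers on nodes."""
--     nodes = []
--     # prefill
--     for _ in range(p_worker):
--         placed = False
--         for n in nodes:
--             if n['used'] + p_gpu <= gpu_per_node: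
--                 n['p_worker'] += 1
--                 n['used'] += p_gpu
--                 placed = True
--                 break
--         if not placed:
--             nodes.append({'p_worker': 1, 'd_worker': 0, 'used': p_gpu})
--     # decode
--     for _ in range(d_worker):
--         placed = False
--         for n in nodes:
--             if n['used'] + d_gpu <= gpu_per_node:
--                 n['d_worker'] += 1
--                 n['used'] += d_gpu
--                 placed = True
--                 break
--         if not placed:
--             nodes.append({'p_worker': 0, 'd_worker': 1, 'used': d_gpu})
--     return [{'p_worker': n['p_worker'], 'd_worker': n['d_worker']} for n in nodes]
-- ===== SOURCE B (Python) =====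
-- GPU_PER_NODE = 8
--
-- def allocate_disagg_nodes(p_worker, p_gpu, d_worker, d_gpu,
--                           gpu_per_node=GPU_PER_NODE):
--     """First-fit with a monotone pointer per phase: since all items of a phase
--     have the same size, a node that once rejects an item rejects every later
--     one, so the scan never restarts."""
--     nodes = []  # mutable [p_worker, d_worker, used]
--     for count, gpu, key in ((p_worker, p_gpu, 0), (d_worker, d_gpu, 1)):
--         ptr = 0
--         for _ in range(count):
--             while ptr < len(nodes) and nodes[ptr][2] + gpu > gpu_per_node:
--                 ptr += 1
--             if ptr == len(nodes):
--                 nodes.append([0, 0, 0])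
--             nodes[ptr][key] += 1
--             nodes[ptr][2] += gpu
--     return [{'p_worker': p, 'd_worker': d} for p, d, _ in nodes]
-- ===== Notes on version B (the rewrite author's own statement) =====
-- stated objective: faster
-- what changed: B replaces A's per-item rescan of all nodes with a per-phase first-fit pointer that never moves backwards (valid because all items of a phase have equal size, so a node that rejects one item rejects all later ones).
import Mathlib
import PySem

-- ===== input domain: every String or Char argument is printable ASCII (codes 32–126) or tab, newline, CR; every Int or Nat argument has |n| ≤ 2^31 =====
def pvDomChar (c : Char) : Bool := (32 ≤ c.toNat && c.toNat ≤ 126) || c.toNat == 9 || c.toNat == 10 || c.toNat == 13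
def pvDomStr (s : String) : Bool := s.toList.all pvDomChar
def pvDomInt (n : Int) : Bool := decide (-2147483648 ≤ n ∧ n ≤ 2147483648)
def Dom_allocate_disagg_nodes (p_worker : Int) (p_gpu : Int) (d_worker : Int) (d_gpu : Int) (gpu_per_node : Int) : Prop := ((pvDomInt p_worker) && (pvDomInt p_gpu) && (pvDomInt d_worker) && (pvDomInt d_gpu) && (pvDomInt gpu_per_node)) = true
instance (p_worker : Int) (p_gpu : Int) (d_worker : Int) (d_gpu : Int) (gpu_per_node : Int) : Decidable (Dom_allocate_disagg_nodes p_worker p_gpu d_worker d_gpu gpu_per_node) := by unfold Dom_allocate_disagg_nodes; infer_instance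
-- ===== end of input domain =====

-- ===== PORT A =====
-- B is a first-fit pointer version of A's greedy placement; proved equal on all inputs.
-- A node dict {'p_worker','d_worker','used'} is ported as the triple (p_worker, d_worker, used).

-- inner `for n in nodes: ... break`: first node that fits gets the item; none = not placed
def pvTryPlaceA (gpu cap : Int) (isP : Bool) : List (Int × Int × Int) → Option (List (Int × Int × Int))
  | [] => none
  | n :: rest =>
      if n.2.2 + gpu ≤ cap then
        some ((if isP then (n.1 + 1, n.2.1, n.2.2 + gpu) else (n.1, n.2.1 + 1, n.2.2 + gpu)) :: rest)
      else (pvTryPlaceA gpu cap isP rest).map (n :: ·)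

-- one iteration of an outer `for _ in range(...)` loop of A
def pvStepA (gpu cap : Int) (isP : Bool) (nodes : List (Int × Int × Int)) : List (Int × Int × Int) :=
  match pvTryPlaceA gpu cap isP nodes with
  | some ns => ns
  | none => nodes ++ [if isP then ((1 : Int), (0 : Int), gpu) else ((0 : Int), (1 : Int), gpu)]

def pvPhaseA (gpu cap : Int) (isP : Bool) : Nat → List (Int × Int × Int) → List (Int × Int × Int)
  | 0, nodes => nodes
  | k + 1, nodes => pvPhaseA gpu cap isP k (pvStepA gpu cap isP nodes)

def allocate_disagg_nodes (p_worker : Int) (p_gpu : Int) (d_worker : Int) (d_gpu : Int) (gpu_per_node : Int) : List (List (String × Int)) :=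
  let nodes := pvPhaseA p_gpu gpu_per_node true p_worker.toNat []
  let nodes := pvPhaseA d_gpu gpu_per_node false d_worker.toNat nodes
  nodes.map (fun n => [("p_worker", n.1), ("d_worker", n.2.1)])

-- ===== PORT B =====
-- B's pointer `ptr` into `nodes` is ported as a zipper: `skipped` = reversed nodes[:ptr], `rest` = nodes[ptr:];
-- `k` = items of the phase still to place.
def pvGoB (gpu cap : Int) (isP : Bool) : List (Int × Int × Int) → List (Int × Int × Int) → Nat → List (Int × Int × Int)
  | skipped, rest, 0 => skipped.reverse ++ rest
  | skipped, [], k + 1 =>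
      -- ptr == len(nodes): append fresh [0,0,0] node, then place into it
      pvGoB gpu cap isP skipped [if isP then ((1 : Int), (0 : Int), gpu) else ((0 : Int), (1 : Int), gpu)] k
  | skipped, n :: rs, k + 1 =>
      if n.2.2 + gpu ≤ cap then
        pvGoB gpu cap isP skipped ((if isP then (n.1 + 1, n.2.1, n.2.2 + gpu) else (n.1, n.2.1 + 1, n.2.2 + gpu)) :: rs) k
      else
        pvGoB gpu cap isP (n :: skipped) rs (k + 1)   -- ptr += 1
  termination_by skipped rest k => (k, rest.length)

def allocate_disagg_nodes_alt (p_worker : Int) (p_gpu : Int) (d_worker : Int) (d_gpu : Int) (gpu_per_node : Int) : List (List (String × Int)) :=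
  let nodes := pvGoB p_gpu gpu_per_node true [] [] p_worker.toNat
  let nodes := pvGoB d_gpu gpu_per_node false [] nodes d_worker.toNat
  nodes.map (fun n => [("p_worker", n.1), ("d_worker", n.2.1)])

-- ===== PRECONDITION & SPEC =====
def Spec_allocate_disagg_nodes (p_worker : Int) (p_gpu : Int) (d_worker : Int) (d_gpu : Int) (gpu_per_node : Int) (out : List (List (String × Int))) : Prop := out = allocate_disagg_nodes_alt p_worker p_gpu d_worker d_gpu gpu_per_node
instance (p_worker : Int) (p_gpu : Int) (d_worker : Int) (d_gpu : Int) (gpu_per_node : Int) (out : List (List (String × Int))) : Decidable (Spec_allocate_disagg_nodes p_worker p_gpu d_worker d_gpu gpu_per_node out) := by unfold Spec_allocate_disagg_nodes; infer_instance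

-- ===== CLAIM (what is proved, stated in full; the proofs are below) =====
def Claim_equal_allocate_disagg_nodes : Prop := ∀ (p_worker : Int) (p_gpu : Int) (d_worker : Int) (d_gpu : Int) (gpu_per_node : Int), Dom_allocate_disagg_nodes p_worker p_gpu d_worker d_gpu gpu_per_node → Spec_allocate_disagg_nodes p_worker p_gpu d_worker d_gpu gpu_per_node (allocate_disagg_nodes p_worker p_gpu d_worker d_gpu gpu_per_node)

-- ===== LEMMAS AND PROOFS =====

-- skipping an all-rejecting prefix commutes with A's inner scan
lemma pvTryPlaceA_prepend (gpu cap : Int) (isP : Bool) (pre rest : List (Int × Int × Int))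
    (h : ∀ n ∈ pre, ¬ n.2.2 + gpu ≤ cap) :
    pvTryPlaceA gpu cap isP (pre ++ rest) = (pvTryPlaceA gpu cap isP rest).map (pre ++ ·) := by
  induction pre with
  | nil =>
      cases h : pvTryPlaceA gpu cap isP rest <;> simp [h]
  | cons n pre ih =>
      have hn : ¬ n.2.2 + gpu ≤ cap := h n (List.mem_cons_self ..)
      simp only [List.cons_append, pvTryPlaceA, if_neg hn,
        ih (fun m hm => h m (List.mem_cons_of_mem _ hm)), Option.map_map]
      rfl

-- main invariant: the pointer loop equals A's phase, as long as every skipped node rejects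
lemma pvGoB_eq_phaseA (gpu cap : Int) (isP : Bool) :
    ∀ (k : Nat) (rest skipped : List (Int × Int × Int)),
      (∀ n ∈ skipped, ¬ n.2.2 + gpu ≤ cap) →
      pvGoB gpu cap isP skipped rest k = pvPhaseA gpu cap isP k (skipped.reverse ++ rest) := by
  intro k
  induction k with
  | zero => intro rest skipped _; simp [pvGoB, pvPhaseA]
  | succ k ih =>
      intro rest
      induction rest with
      | nil =>
          intro skipped h
          have hnone : pvTryPlaceA gpu cap isP (skipped.reverse ++ []) = none := by
            rw [pvTryPlaceA_prepend gpu cap isP _ _ (by simpa using h)]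
            simp [pvTryPlaceA]
          simp only [List.append_nil] at hnone
          rw [pvGoB, ih _ skipped h, pvPhaseA]
          simp [pvStepA, hnone]
      | cons n rs ihr =>
          intro skipped h
          by_cases hn : n.2.2 + gpu ≤ cap
          · have hsome : pvTryPlaceA gpu cap isP (skipped.reverse ++ n :: rs) =
                some (skipped.reverse ++
                  (if isP then (n.1 + 1, n.2.1, n.2.2 + gpu) else (n.1, n.2.1 + 1, n.2.2 + gpu)) :: rs) := by
              rw [pvTryPlaceA_prepend gpu cap isP _ _ (by simpa using h)]
              simp [pvTryPlaceA, hn]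
            rw [pvGoB, if_pos hn, ih _ skipped h, pvPhaseA]
            simp [pvStepA, hsome]
          · have h' : ∀ m ∈ n :: skipped, ¬ m.2.2 + gpu ≤ cap := by
              intro m hm
              rcases List.mem_cons.mp hm with rfl | hm
              · exact hn
              · exact h m hm
            rw [pvGoB, if_neg hn, ihr (n :: skipped) h']
            simp


-- the pointer starts at 0 each phase: the zipper with empty skipped prefix is A's phase
lemma pvGoB_nil (gpu cap : Int) (isP : Bool) (k : Nat) (rest : List (Int × Int × Int)) :
    pvGoB gpu cap isP [] rest k = pvPhaseA gpu cap isP k rest := by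
  simpa using pvGoB_eq_phaseA gpu cap isP k rest [] (by simp)

-- ===== VERDICT (by name: the statement is the Claim_ definition above) =====
theorem allocate_disagg_nodes_spec : Claim_equal_allocate_disagg_nodes := by
  intro p_worker p_gpu d_worker d_gpu gpu_per_node _
  simp [Spec_allocate_disagg_nodes, allocate_disagg_nodes, allocate_disagg_nodes_alt, pvGoB_nil]
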